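-- pv_equiv track=rewrite | github.com/79837383/HK_CTR | avazu_data_processer.py | concat_sparse_vectors
-- ===== SOURCE A (Python) =====
-- def concat_sparse_vectors(inputs, dims):
--     '''
--     Concaterate more than one sparse vectors into one.
--
--     @inputs: list
--         list of sparse vector
--     @dims: list of int
--         dimention of each sparse vector
--     '''
--     res = []
--     assert len(inputs) == len(dims)
--     start = 0
--     for no, vec in enumerate(inputs):
--         for v in vec:
--             res.append(v + start)
--             # print v,start
--         start += dims[no]
--
--         #print "dims[no]",dims[no]
--     # print dims
--     # print inputs
--     # print res
--     # [5, 3, 11, 8, 5, 4, 24]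
--     # [[1], [2], [3], [1], [1], [2], [0]]
--     # [1, 7, 11, 20, 28, 34, 36]
--     # exit(0)
--     return res
-- ===== SOURCE B (Python) =====
-- def concat_sparse_vectors(inputs, dims):
--     '''
--     Concaterate more than one sparse vectors into one.
--
--     @inputs: list
--         list of sparse vector
--     @dims: list of int
--         dimention of each sparse vector
--     '''
--     assert len(inputs) == len(dims)
--     if not inputs:
--         return []
--     if len(inputs) == 1:
--         return list(inputs[0])
--     m = len(inputs) // 2
--     left = concat_sparse_vectors(inputs[:m], dims[:m])
--     right = concat_sparse_vectors(inputs[m:], dims[m:])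
--     off = sum(dims[:m])
--     return left + [x + off for x in right]
-- ===== Notes on version B (the rewrite author's own statement) =====
-- stated objective: alternative
-- what changed: A does one fused left-to-right loop carrying a running start offset while emitting; B is a divide-and-conquer recursion that concatenates the two halves' results and shifts the entire right-half result by sum(dims[:m]), maintaining no running state at all.
import Mathlib
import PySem

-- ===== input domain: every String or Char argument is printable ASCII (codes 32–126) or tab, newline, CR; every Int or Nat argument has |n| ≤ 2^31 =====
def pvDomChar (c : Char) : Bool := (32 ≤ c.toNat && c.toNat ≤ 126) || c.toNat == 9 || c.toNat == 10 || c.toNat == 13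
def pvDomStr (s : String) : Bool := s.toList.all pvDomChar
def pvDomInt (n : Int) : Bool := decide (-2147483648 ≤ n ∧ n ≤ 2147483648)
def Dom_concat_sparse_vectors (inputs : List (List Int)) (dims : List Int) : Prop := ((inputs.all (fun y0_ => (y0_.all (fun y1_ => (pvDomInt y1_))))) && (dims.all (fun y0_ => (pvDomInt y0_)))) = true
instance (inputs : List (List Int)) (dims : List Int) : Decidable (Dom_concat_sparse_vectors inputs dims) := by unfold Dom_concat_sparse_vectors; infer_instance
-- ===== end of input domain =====

-- B replaces A's fused left-to-right loop with a running start offset by a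
-- divide-and-conquer recursion: concatenate the two halves' results, shifting
-- the whole right-half result by sum(dims[:m]); equal return values on all
-- inputs passing A's assert.

-- ===== PORT A =====
-- loop 'for no, vec in enumerate(inputs)': state = (no, start, res);
-- dims[no] via pyGet? (in range whenever the assert holds).
def pvAloop (dims : List Int) : List (List Int) → Nat → Int → List Int → List Int
  | [], _, _, res => res
  | vec :: rest, no, start, res =>
      pvAloop dims rest (no + 1)
        (start + ((PySem.List.pyGet? dims (no : Int)).getD 0))
        (res ++ vec.map (· + start))

def concat_sparse_vectors (inputs : List (List Int)) (dims : List Int) : List Int :=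
  pvAloop dims inputs 0 0 []

-- ===== PORT B =====
-- recursive divide and conquer: slices inputs[:m]/dims[:m] = take m,
-- inputs[m:]/dims[m:] = drop m (exact since 0 ≤ m ≤ length); sum = List.sum.
def concat_sparse_vectors_alt : List (List Int) → List Int → List Int
  | [], _ => []
  | [v], _ => v
  | v₁ :: v₂ :: vs, dims =>
      concat_sparse_vectors_alt ((v₁ :: v₂ :: vs).take ((v₁ :: v₂ :: vs).length / 2))
          (dims.take ((v₁ :: v₂ :: vs).length / 2)) ++
        (concat_sparse_vectors_alt ((v₁ :: v₂ :: vs).drop ((v₁ :: v₂ :: vs).length / 2))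
            (dims.drop ((v₁ :: v₂ :: vs).length / 2))).map
          (· + (dims.take ((v₁ :: v₂ :: vs).length / 2)).sum)
termination_by inputs _ => inputs.length
decreasing_by all_goals (simp only [List.length_take, List.length_drop, List.length_cons]; omega)

-- ===== PRECONDITION & SPEC =====
-- A's 'assert len(inputs) == len(dims)' raises AssertionError otherwise.
def Pre_concat_sparse_vectors (inputs : List (List Int)) (dims : List Int) : Prop :=
  inputs.length = dims.length
instance (inputs : List (List Int)) (dims : List Int) : Decidable (Pre_concat_sparse_vectors inputs dims) := by unfold Pre_concat_sparse_vectors; infer_instance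

def pvWitness_concat_sparse_vectors : List (List Int) × List Int := ([[1], [0, 2]], [5, 3])

def Spec_concat_sparse_vectors (inputs : List (List Int)) (dims : List Int) (out : List Int) : Prop := out = concat_sparse_vectors_alt inputs dims
instance (inputs : List (List Int)) (dims : List Int) (out : List Int) : Decidable (Spec_concat_sparse_vectors inputs dims out) := by unfold Spec_concat_sparse_vectors; infer_instance

-- ===== CLAIM (what is proved, stated in full; the proofs are below) =====
def Claim_equal_concat_sparse_vectors : Prop := ∀ (inputs : List (List Int)) (dims : List Int), Dom_concat_sparse_vectors inputs dims → Pre_concat_sparse_vectors inputs dims → Spec_concat_sparse_vectors inputs dims (concat_sparse_vectors inputs dims)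

-- ===== LEMMAS AND PROOFS =====

-- mathematical specification, used only by the proofs
def pvSpec : Int → List (List Int) → List Int → List Int
  | _, [], _ => []
  | _, _ :: _, [] => []
  | s, v :: vs, d :: ds => v.map (· + s) ++ pvSpec (s + d) vs ds

theorem pvSpec_shift (vs : List (List Int)) : ∀ (ds : List Int) (s t : Int),
    pvSpec (t + s) vs ds = (pvSpec t vs ds).map (· + s) := by
  induction vs with
  | nil => intro ds s t; simp [pvSpec]
  | cons v vs ih =>
      intro ds s t
      cases ds with
      | nil => simp [pvSpec]
      | cons d ds =>
          simp only [pvSpec, List.map_append, List.map_map]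
          congr 1
          · apply List.map_congr_left; intro x _; simp only [Function.comp_apply]; ring
          · have : t + s + d = (t + d) + s := by ring
            rw [this, ih]

theorem pvSpec_append (l : List (List Int)) : ∀ (dl : List Int), l.length = dl.length →
    ∀ (r : List (List Int)) (dr : List Int) (s : Int),
    pvSpec s (l ++ r) (dl ++ dr) = pvSpec s l dl ++ pvSpec (s + dl.sum) r dr := by
  induction l with
  | nil =>
      intro dl h r dr s
      cases dl with
      | nil => simp [pvSpec]
      | cons d ds => simp at h
  | cons v vs ih =>
      intro dl h r dr s
      cases dl with
      | nil => simp at h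
      | cons d ds =>
          simp only [List.length_cons] at h
          simp only [List.cons_append, pvSpec, List.sum_cons]
          rw [ih ds (by omega)]
          simp only [List.append_assoc]
          congr 2
          ring_nf

theorem pvAlt_eq (n : Nat) : ∀ (inputs : List (List Int)) (dims : List Int),
    inputs.length ≤ n → inputs.length = dims.length →
    concat_sparse_vectors_alt inputs dims = pvSpec 0 inputs dims := by
  induction n with
  | zero =>
      intro inputs dims hn h
      cases inputs with
      | nil =>
          cases dims with
          | nil => simp [concat_sparse_vectors_alt, pvSpec]
          | cons d ds => simp at h
      | cons v vs => simp at hn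
  | succ n ih =>
      intro inputs dims hn h
      match inputs, dims with
      | [], [] => simp [concat_sparse_vectors_alt, pvSpec]
      | [v], d :: ds =>
          simp only [List.length_cons] at h
          have : ds = [] := List.eq_nil_of_length_eq_zero (by simpa using h.symm)
          subst this
          simp [concat_sparse_vectors_alt, pvSpec]
      | v₁ :: v₂ :: vs, dims =>
          rw [concat_sparse_vectors_alt]
          set l := v₁ :: v₂ :: vs with hl
          set m := l.length / 2 with hm
          have hL : l.length = vs.length + 2 := by rw [hl]; simp
          have hml : m < l.length := by omega
          have hm0 : 1 ≤ m := by omega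
          have hlen1 : (l.take m).length = m := by
            rw [List.length_take]; omega
          have hlen2 : (dims.take m).length = m := by
            rw [List.length_take]; omega
          have hlen3 : (l.drop m).length = (dims.drop m).length := by
            simp [List.length_drop, h]
          rw [ih (l.take m) (dims.take m) (by omega) (by rw [hlen1, hlen2]),
              ih (l.drop m) (dims.drop m) (by rw [List.length_drop]; omega) hlen3]
          have hsplit := pvSpec_append (l.take m) (dims.take m)
            (by rw [hlen1, hlen2]) (l.drop m) (dims.drop m) 0
          rw [List.take_append_drop, List.take_append_drop] at hsplit
          rw [hsplit, zero_add, ← pvSpec_shift]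
          rw [zero_add]

theorem pvAloop_eq (inputs : List (List Int)) :
    ∀ (pre dims2 : List Int), inputs.length = dims2.length →
    ∀ (start : Int) (res : List Int),
      pvAloop (pre ++ dims2) inputs pre.length start res = res ++ pvSpec start inputs dims2 := by
  induction inputs with
  | nil =>
      intro pre dims2 h start res
      cases dims2 with
      | nil => simp [pvAloop, pvSpec]
      | cons d ds => simp at h
  | cons vec rest ih =>
      intro pre dims2 h start res
      cases dims2 with
      | nil => simp at h
      | cons d ds =>
          simp only [List.length_cons] at h
          have hget : PySem.List.pyGet? (pre ++ d :: ds) (pre.length : Int) = some d :=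
            PySem.List.pyGet?_append_length pre ds d
          simp only [pvAloop, hget, Option.getD_some]
          have hlist : pre ++ d :: ds = (pre ++ [d]) ++ ds := by simp
          have hlen : (pre ++ [d]).length = pre.length + 1 := by simp
          rw [hlist, ← hlen, ih (pre ++ [d]) ds (by omega) (start + d) (res ++ vec.map (· + start))]
          simp [pvSpec]

-- ===== VERDICT (by name: the statement is the Claim_ definition above) =====
theorem concat_sparse_vectors_spec : Claim_equal_concat_sparse_vectors := by
  intro inputs dims _ hpre
  unfold Spec_concat_sparse_vectors concat_sparse_vectors
  rw [pvAlt_eq inputs.length inputs dims le_rfl hpre]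
  simpa using pvAloop_eq inputs [] dims hpre 0 []
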